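-- pv_equiv track=rewrite | github.com/perudoxr488/spyder | comandos/compras.py | _extract_first_number
-- ===== SOURCE A (Python) =====
-- def _extract_first_number(text: str | None) -> int | None:
--     if not text:
--         return None
--     current = ""
--     for ch in str(text):
--         if ch.isdigit():
--             current += ch
--         elif current:
--             break
--     return int(current) if current else None
-- ===== SOURCE B (Python) =====
-- def _extract_first_number(text):
--     if not text:
--         return None
--     s = str(text)
--     mask = [c.isdigit() for c in s]
--     if True not in mask:
--         return None
--     start = mask.index(True)
--     try:
--         end = mask.index(False, start)
--     except ValueError:
--         end = len(s)
--     return int(s[start:end])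
-- ===== Notes on version B (the rewrite author's own statement) =====
-- stated objective: alternative
-- what changed: Replaces A's single accumulate-and-break character scan by an index-based staged computation: build a boolean isdigit mask, locate the run with two list.index calls (first True, then first False from there), and convert the slice s[start:end]; no accumulator and no break.
import Mathlib
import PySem

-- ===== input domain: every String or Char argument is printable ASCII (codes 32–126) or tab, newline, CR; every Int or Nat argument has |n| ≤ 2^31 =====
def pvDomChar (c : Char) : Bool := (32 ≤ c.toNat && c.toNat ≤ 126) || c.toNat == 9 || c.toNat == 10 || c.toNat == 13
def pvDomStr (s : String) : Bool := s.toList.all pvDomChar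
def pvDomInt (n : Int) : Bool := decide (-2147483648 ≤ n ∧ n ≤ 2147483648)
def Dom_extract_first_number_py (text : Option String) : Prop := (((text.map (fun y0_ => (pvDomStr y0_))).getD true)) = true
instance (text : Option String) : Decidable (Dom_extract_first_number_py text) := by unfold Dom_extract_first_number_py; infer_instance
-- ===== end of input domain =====

-- B replaces A's accumulate-and-break scan by an index-based staged computation (isdigit
-- mask, two list.index calls, one slice); objective: alternative decomposition, same cost.

-- ===== PORT A =====
-- A's loop over str(text): accumulate digits into `current`, break at the first
-- non-digit once `current` is nonempty
def pvLoopA : List Char → List Char → List Char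
  | [], cur => cur
  | c :: rest, cur =>
    if PySem.Chars.isdigit c then pvLoopA rest (cur ++ [c])
    else if cur ≠ [] then cur
    else pvLoopA rest cur

def extract_first_number_py (text : Option String) : Option Int :=
  match text with
  | none => none
  | some s =>
    if s.toList.isEmpty then none          -- `if not text`
    else
      let current := pvLoopA s.toList []
      if current.isEmpty then none else PySem.Int.ofChars? current   -- int(current)

-- ===== PORT B =====
-- body after the guard: mask = [c.isdigit() for c in s]; start = mask.index(True);
-- end = mask.index(False, start) (ported as start + index in the dropped tail — exact,
-- since Python searches from position start) or len(s); int(s[start:end])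
def pvIdxB (cs : List Char) : Option Int :=
  match PySem.List.index? (cs.map PySem.Chars.isdigit) true with
  | none => none                                          -- `if True not in mask`
  | some start =>
    PySem.Int.ofChars? (PySem.List.slice cs (some (start : Int))
      (some (((match PySem.List.index? ((cs.map PySem.Chars.isdigit).drop start) false with
               | some j => start + j
               | none => cs.length) : Nat) : Int)))

def extract_first_number_py_alt (text : Option String) : Option Int :=
  match text with
  | none => none
  | some s =>
    if s.toList.isEmpty then none          -- `if not text`
    else pvIdxB s.toList

-- ===== PRECONDITION & SPEC =====
def Spec_extract_first_number_py (text : Option String) (out : Option Int) : Prop := out = extract_first_number_py_alt text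
instance (text : Option String) (out : Option Int) : Decidable (Spec_extract_first_number_py text out) := by unfold Spec_extract_first_number_py; infer_instance

-- ===== CLAIM (what is proved, stated in full; the proofs are below) =====
def Claim_equal_extract_first_number_py : Prop := ∀ (text : Option String), Dom_extract_first_number_py text → Spec_extract_first_number_py text (extract_first_number_py text)

-- ===== LEMMAS AND PROOFS =====

-- once `cur` is nonempty, A's loop appends exactly the leading digit run
theorem pvLoopA_run (cs : List Char) : ∀ cur : List Char, cur ≠ [] →
    pvLoopA cs cur = cur ++ cs.takeWhile PySem.Chars.isdigit := by
  induction cs with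
  | nil => intro cur _; simp [pvLoopA]
  | cons c rest ih =>
    intro cur hne
    cases h : PySem.Chars.isdigit c with
    | true => simp [pvLoopA, h, ih (cur ++ [c]) (by simp)]
    | false => simp [pvLoopA, h, hne]

-- A's loop from the empty accumulator: digit run after the non-digit prefix
theorem pvLoopA_char (cs : List Char) :
    pvLoopA cs [] = (cs.dropWhile (fun c => !PySem.Chars.isdigit c)).takeWhile PySem.Chars.isdigit := by
  induction cs with
  | nil => rfl
  | cons c rest ih =>
    cases h : PySem.Chars.isdigit c with
    | true =>
      simp [pvLoopA, h, pvLoopA_run rest [c] (by simp)]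
    | false => simpa [pvLoopA, h, List.dropWhile_cons] using ih

-- first False in the isdigit mask (or the length) cuts off exactly the digit run
theorem take_firstFalse (cs : List Char) :
    cs.take (match PySem.List.index? (cs.map PySem.Chars.isdigit) false with
              | some j => j
              | none => cs.length)
      = cs.takeWhile PySem.Chars.isdigit := by
  induction cs with
  | nil => rfl
  | cons c rest ih =>
    cases h : PySem.Chars.isdigit c with
    | true =>
      have e1 : PySem.List.index? (true :: rest.map PySem.Chars.isdigit) false
          = (PySem.List.index? (rest.map PySem.Chars.isdigit) false).map (· + 1) :=
        PySem.List.index?_cons_of_ne _ (by simp)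
      rw [List.map_cons, h, e1]
      cases hj : PySem.List.index? (rest.map PySem.Chars.isdigit) false with
      | none => rw [hj] at ih; simpa [List.takeWhile_cons, h] using ih
      | some j => rw [hj] at ih; simpa [List.takeWhile_cons, h] using ih
    | false =>
      have e0 : PySem.List.index? (false :: rest.map PySem.Chars.isdigit) false = some 0 :=
        PySem.List.index?_cons_self _ _
      rw [List.map_cons, h, e0]
      simp [h]

-- slicing from 0 with a natural upper bound is a take
theorem slice_zero_take (cs : List Char) (n : Nat) :
    PySem.List.slice cs (some ((0 : Nat) : Int)) (some ((n : Nat) : Int)) = cs.take n := by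
  rw [PySem.List.slice_natCast]; simp

-- core: B's index computation equals A's characterised loop result
theorem pvIdxB_char (cs : List Char) :
    pvIdxB cs =
      (if ((cs.dropWhile (fun c => !PySem.Chars.isdigit c)).takeWhile PySem.Chars.isdigit).isEmpty
       then none
       else PySem.Int.ofChars? ((cs.dropWhile (fun c => !PySem.Chars.isdigit c)).takeWhile PySem.Chars.isdigit)) := by
  induction cs with
  | nil => rfl
  | cons c rest ih =>
    cases h : PySem.Chars.isdigit c with
    | true =>
      -- head is a digit: start = 0, the slice is a take, cut at the first False
      have e0 : PySem.List.index? (true :: rest.map PySem.Chars.isdigit) true = some 0 :=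
        PySem.List.index?_cons_self _ _
      have hTake := take_firstFalse (c :: rest)
      rw [List.map_cons, h] at hTake
      unfold pvIdxB
      rw [List.map_cons, h, e0]
      simp only [List.drop_zero, Nat.zero_add]
      rw [slice_zero_take, hTake]
      simp [h]
    | false =>
      -- head is not a digit: B on c :: rest computes the same as B on rest
      have e1 : PySem.List.index? (false :: rest.map PySem.Chars.isdigit) true
          = (PySem.List.index? (rest.map PySem.Chars.isdigit) true).map (· + 1) :=
        PySem.List.index?_cons_of_ne _ (by simp)
      have hstep : pvIdxB (c :: rest) = pvIdxB rest := by
        unfold pvIdxB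
        rw [List.map_cons, h, e1]
        cases hk : PySem.List.index? (rest.map PySem.Chars.isdigit) true with
        | none => simp
        | some k =>
          simp only [Option.map_some]
          have hdrop : (false :: rest.map PySem.Chars.isdigit).drop (k + 1)
              = (rest.map PySem.Chars.isdigit).drop k := by simp
          rw [hdrop]
          cases hj : PySem.List.index? ((rest.map PySem.Chars.isdigit).drop k) false with
          | none =>
            simp only
            rw [PySem.List.slice_natCast, PySem.List.slice_natCast]
            simp [Nat.succ_sub_succ]
          | some j =>
            simp only
            have h1 : PySem.List.slice (c :: rest) (some ((k + 1 : Nat) : Int)) (some ((k + 1 + j : Nat) : Int))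
                = ((c :: rest).drop (k + 1)).take (k + 1 + j - (k + 1)) := PySem.List.slice_natCast _ _ _
            have h2 : PySem.List.slice rest (some ((k : Nat) : Int)) (some ((k + j : Nat) : Int))
                = (rest.drop k).take (k + j - k) := PySem.List.slice_natCast _ _ _
            rw [h1, h2]
            simp
      rw [hstep, ih]
      simp [h]

-- ===== VERDICT (by name: the statement is the Claim_ definition above) =====
theorem extract_first_number_py_spec : Claim_equal_extract_first_number_py := by
  intro text _
  unfold Spec_extract_first_number_py extract_first_number_py extract_first_number_py_alt
  match text with
  | none => rfl
  | some s =>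
    by_cases he : s.toList.isEmpty
    · simp [he]
    · simp only [he, if_false, Bool.false_eq_true]
      rw [pvLoopA_char, pvIdxB_char]
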